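-- pv_equiv track=rewrite | github.com/bishalregmi105B/brighter-nepal-api | app/routes/subjects.py | _normalize_subjects
-- ===== SOURCE A (Python) =====
-- def _normalize_subjects(values):
--     normalized = {}
--     for value in values:
--         subject = (value or '').strip()
--         if not subject:
--             continue
--         key = subject.lower()
--         if key not in normalized:
--             normalized[key] = subject
--     return [normalized[key] for key in sorted(normalized.keys())]
-- ===== SOURCE B (Python) =====
-- def _normalize_subjects(values):
--     cleaned = []
--     for value in values:
--         s = (value or '').strip()
--         if s:
--             cleaned.append(s)
--     ordered = sorted(cleaned, key=str.lower)
--     result = []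
--     prev = None
--     for s in ordered:
--         k = s.lower()
--         if k != prev:
--             result.append(s)
--             prev = k
--     return result
-- ===== Notes on version B (the rewrite author's own statement) =====
-- stated objective: alternative
-- what changed: Replaces the first-wins dict (membership test per element, then a second sort over the keys) by a single stable sort of the cleaned values keyed on lowercase followed by one adjacent-dedupe pass that keeps the first element of each equal-key run.
import Mathlib
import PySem

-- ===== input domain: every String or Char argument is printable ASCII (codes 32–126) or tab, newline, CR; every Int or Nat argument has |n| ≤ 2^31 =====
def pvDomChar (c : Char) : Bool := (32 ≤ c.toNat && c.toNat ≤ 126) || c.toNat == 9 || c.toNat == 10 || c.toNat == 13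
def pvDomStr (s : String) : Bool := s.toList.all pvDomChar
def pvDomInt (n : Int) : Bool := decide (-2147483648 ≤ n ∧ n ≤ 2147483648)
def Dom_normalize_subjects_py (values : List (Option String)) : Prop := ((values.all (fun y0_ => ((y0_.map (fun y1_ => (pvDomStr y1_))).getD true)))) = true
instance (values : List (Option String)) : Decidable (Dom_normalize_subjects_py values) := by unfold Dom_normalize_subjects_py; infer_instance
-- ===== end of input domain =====

-- B replaces A's first-wins dict + key sort by one stable sort on the lowercase key
-- followed by an adjacent-dedupe pass (alternative decomposition, same asymptotic cost).

-- ===== PORT A =====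
-- literal transliteration of A: build the first-wins dict keyed by lowercase, then map
-- the sorted keys through it (the lookup normalized[key] always hits, so getD is exact).
def normalize_subjects_py (values : List (Option String)) : List String :=
  let normalized := values.foldl (fun d v =>
    let subject := PySem.Str.strip (v.getD "")
    if subject = "" then d
    else
      let key := PySem.Str.lower subject
      if d.contains key then d else d.insert key subject) PySem.Dict.empty
  (PySem.List.sorted normalized.keys (fun k => k) false).map (fun k => normalized.getD k "")

-- ===== PORT B =====
-- the for-loop with mutable `prev` of Source B, as structural recursion over the sorted list
def dedupeAdjAux (prev : Option String) : List String → List String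
  | [] => []
  | s :: rest =>
    let k := PySem.Str.lower s
    if some k ≠ prev then s :: dedupeAdjAux (some k) rest
    else dedupeAdjAux prev rest

def normalize_subjects_py_alt (values : List (Option String)) : List String :=
  let cleaned := values.filterMap (fun v =>
    let s := PySem.Str.strip (v.getD "")
    if s = "" then none else some s)
  let ordered := PySem.List.sorted cleaned PySem.Str.lower false
  dedupeAdjAux none ordered

-- ===== PRECONDITION & SPEC =====
def Spec_normalize_subjects_py (values : List (Option String)) (out : List String) : Prop := out = normalize_subjects_py_alt values
instance (values : List (Option String)) (out : List String) : Decidable (Spec_normalize_subjects_py values out) := by unfold Spec_normalize_subjects_py; infer_instance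

-- ===== CLAIM (what is proved, stated in full; the proofs are below) =====
def Claim_equal_normalize_subjects_py : Prop := ∀ (values : List (Option String)), Dom_normalize_subjects_py values → Spec_normalize_subjects_py values (normalize_subjects_py values)

-- ===== LEMMAS AND PROOFS =====

-- the per-element dict step of A, restricted to an already cleaned (stripped, non-empty) subject
def stepS (d : PySem.Dict String String) (s : String) : PySem.Dict String String :=
  if d.contains (PySem.Str.lower s) then d else d.insert (PySem.Str.lower s) s

-- the cleaned list (stripped values, empties dropped), as B computes it
def cleanVals (values : List (Option String)) : List String :=
  values.filterMap (fun v =>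
    let s := PySem.Str.strip (v.getD "")
    if s = "" then none else some s)

-- A's fold over raw values equals the fold of stepS over the cleaned list
theorem foldA_eq (values : List (Option String)) (d : PySem.Dict String String) :
    values.foldl (fun d v =>
      let subject := PySem.Str.strip (v.getD "")
      if subject = "" then d
      else
        let key := PySem.Str.lower subject
        if d.contains key then d else d.insert key subject) d
    = (cleanVals values).foldl stepS d := by
  induction values generalizing d with
  | nil => rfl
  | cons v t ih =>
    simp only [List.foldl, cleanVals, List.filterMap]
    by_cases h : PySem.Str.strip (v.getD "") = ""
    · simp [h, ih, cleanVals]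
    · simp [h, ih, cleanVals, stepS]

-- lookup in the dict built by the stepS fold: first-wins semantics
theorem getD_loop (cs : List String) (d : PySem.Dict String String) (k : String) :
    ((cs.foldl stepS d).getD k "")
      = if d.contains k then d.getD k ""
        else ((cs.filter (fun s => PySem.Str.lower s == k)).headD "") := by
  induction cs generalizing d with
  | nil =>
    by_cases h : d.contains k
    · simp [h]
    · simp [h, PySem.Dict.getD_of_not_contains _ _ (by simpa using h)]
  | cons s t ih =>
    simp only [List.foldl, List.filter]
    by_cases hc : d.contains (PySem.Str.lower s) = true
    · rw [show stepS d s = d by simp [stepS, hc]]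
      rw [ih]
      by_cases hk : d.contains k
      · simp [hk]
      · have hne : ¬ (PySem.Str.lower s == k) = true := by
          intro hb
          exact hk (by rwa [eq_of_beq hb] at hc)
        simp [hk, hne]
    · rw [show stepS d s = d.insert (PySem.Str.lower s) s by
        simp [stepS, hc]]
      rw [ih]
      by_cases hk : k = PySem.Str.lower s
      · subst hk
        simp [Bool.of_not_eq_true hc]
      · have hco : (d.insert (PySem.Str.lower s) s).contains k = d.contains k := by
          simp [PySem.Dict.contains_insert, hk]
        have hne : ¬ (PySem.Str.lower s == k) = true := by
          simp; exact fun h => hk h.symm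
        simp [hco, PySem.Dict.getD_insert, hk, hne]

-- keys of the dict built by the stepS fold: ordered dedup of the lowercase keys
theorem keys_loop (cs : List String) (d : PySem.Dict String String) :
    ((cs.foldl stepS d).keys) = List.foldl PySem.Set.add d.keys (cs.map PySem.Str.lower) := by
  induction cs generalizing d with
  | nil => rfl
  | cons s t ih =>
    simp only [List.foldl, List.map]
    by_cases hc : d.contains (PySem.Str.lower s) = true
    · rw [show stepS d s = d by simp [stepS, hc]]
      rw [ih]
      have hmem : PySem.Str.lower s ∈ d.keys :=
        (PySem.Dict.contains_iff_mem_keys d _).1 hc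
      have : PySem.Set.add d.keys (PySem.Str.lower s) = d.keys := by
        simp [PySem.Set.add, hmem]
      rw [this]
    · rw [show stepS d s = d.insert (PySem.Str.lower s) s by simp [stepS, hc]]
      rw [ih]
      have hmem : PySem.Str.lower s ∉ d.keys := fun hm =>
        hc ((PySem.Dict.contains_iff_mem_keys d _).2 hm)
      have h1 : PySem.Set.add d.keys (PySem.Str.lower s) = d.keys ++ [PySem.Str.lower s] := by
        simp [PySem.Set.add, hmem]
      rw [h1, PySem.Dict.keys_insert_of_not_contains _ _ (Bool.of_not_eq_true hc)]

-- insertBy with the lowercase-key comparison preserves key-sortedness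
theorem insertBy_pairwise (x : String) (ys : List String)
    (h : ys.Pairwise (fun a b => PySem.Str.lower a ≤ PySem.Str.lower b)) :
    (PySem.List.insertBy (fun a b => decide (PySem.Str.lower a < PySem.Str.lower b)) x ys).Pairwise
      (fun a b => PySem.Str.lower a ≤ PySem.Str.lower b) := by
  induction ys with
  | nil => simp [PySem.List.insertBy]
  | cons y t ih =>
    rw [List.pairwise_cons] at h
    by_cases hlt : PySem.Str.lower x < PySem.Str.lower y
    · rw [show PySem.List.insertBy (fun a b => decide (PySem.Str.lower a < PySem.Str.lower b)) x (y :: t)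
          = x :: y :: t by simp [PySem.List.insertBy, hlt]]
      refine List.pairwise_cons.2 ⟨?_, List.pairwise_cons.2 ⟨h.1, h.2⟩⟩
      intro z hz
      rcases List.mem_cons.1 hz with rfl | hz'
      · exact le_of_lt hlt
      · exact le_trans (le_of_lt hlt) (h.1 z hz')
    · rw [show PySem.List.insertBy (fun a b => decide (PySem.Str.lower a < PySem.Str.lower b)) x (y :: t)
          = y :: PySem.List.insertBy (fun a b => decide (PySem.Str.lower a < PySem.Str.lower b)) x t by
          simp [PySem.List.insertBy, hlt]]
      refine List.pairwise_cons.2 ⟨?_, ih h.2⟩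
      intro z hz
      rcases (PySem.List.mem_insertBy _ x z t).1 hz with rfl | hz'
      · exact not_lt.1 hlt
      · exact h.1 z hz' 

-- stability of insertBy, seen through a single key class
theorem insertBy_filter (x : String) (ys : List String) (k : String)
    (h : ys.Pairwise (fun a b => PySem.Str.lower a ≤ PySem.Str.lower b)) :
    (PySem.List.insertBy (fun a b => decide (PySem.Str.lower a < PySem.Str.lower b)) x ys).filter
        (fun s => PySem.Str.lower s == k)
      = if PySem.Str.lower x == k then ys.filter (fun s => PySem.Str.lower s == k) ++ [x]
        else ys.filter (fun s => PySem.Str.lower s == k) := by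
  induction ys with
  | nil =>
    by_cases hx : (PySem.Str.lower x == k) = true <;> simp [PySem.List.insertBy, List.filter, hx]
  | cons y t ih =>
    rw [List.pairwise_cons] at h
    by_cases hlt : PySem.Str.lower x < PySem.Str.lower y
    · rw [show PySem.List.insertBy (fun a b => decide (PySem.Str.lower a < PySem.Str.lower b)) x (y :: t)
          = x :: y :: t by simp [PySem.List.insertBy, hlt]]
      by_cases hx : (PySem.Str.lower x == k) = true
      · have hk : k = PySem.Str.lower x := (eq_of_beq hx).symm
        have hnil : (y :: t).filter (fun s => PySem.Str.lower s == k) = [] := by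
          rw [List.filter_eq_nil_iff]
          intro z hz
          have hyz : PySem.Str.lower y ≤ PySem.Str.lower z := by
            rcases List.mem_cons.1 hz with rfl | hz'
            · exact le_refl _
            · exact h.1 z hz'
          have hlt' : PySem.Str.lower x < PySem.Str.lower z := lt_of_lt_of_le hlt hyz
          simpa [hk] using ne_of_gt hlt'
        rw [List.filter_cons, if_pos hx, hnil, if_pos hx]
        rfl
      · rw [List.filter_cons, if_neg hx, if_neg hx]
    · rw [show PySem.List.insertBy (fun a b => decide (PySem.Str.lower a < PySem.Str.lower b)) x (y :: t)
          = y :: PySem.List.insertBy (fun a b => decide (PySem.Str.lower a < PySem.Str.lower b)) x t by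
          simp [PySem.List.insertBy, hlt]]
      have ihr := ih h.2
      simp only [List.filter_cons]
      rw [ihr]
      by_cases hx : (PySem.Str.lower x == k) = true <;>
        by_cases hy : (PySem.Str.lower y == k) = true <;>
          simp [hx, hy]

-- stability of the insertion-sort fold, generalized over a sorted accumulator
theorem sorted_filter_aux (xs : List String) (acc : List String) (k : String)
    (h : acc.Pairwise (fun a b => PySem.Str.lower a ≤ PySem.Str.lower b)) :
    (xs.foldl (fun acc x => PySem.List.insertBy (fun a b => decide (PySem.Str.lower a < PySem.Str.lower b)) x acc) acc).filter (fun s => PySem.Str.lower s == k)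
      = acc.filter (fun s => PySem.Str.lower s == k) ++ xs.filter (fun s => PySem.Str.lower s == k) := by
  induction xs generalizing acc with
  | nil => simp
  | cons x t ih =>
    simp only [List.foldl]
    rw [ih _ (insertBy_pairwise x acc h), insertBy_filter x acc k h]
    by_cases hx : (PySem.Str.lower x == k) = true <;>
      simp [List.filter, hx, List.append_assoc]

-- stability of the whole sort: each key class keeps its original order
theorem sorted_filter_key (xs : List String) (k : String) :
    (PySem.List.sorted xs PySem.Str.lower false).filter (fun s => PySem.Str.lower s == k)
      = xs.filter (fun s => PySem.Str.lower s == k) := by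
  rw [PySem.List.sorted_eq_foldl_insertBy]
  simpa using sorted_filter_aux xs [] k List.Pairwise.nil

-- placeholder

-- every element emitted by dedupeAdjAux after prev = some p has key strictly above p
theorem dedupe_chain (ys : List String) (p : String)
    (h1 : ys.Pairwise (fun a b => PySem.Str.lower a ≤ PySem.Str.lower b))
    (h2 : ∀ y ∈ ys, p ≤ PySem.Str.lower y) :
    ∀ x ∈ dedupeAdjAux (some p) ys, p < PySem.Str.lower x := by
  induction ys generalizing p with
  | nil => intro x hx; simp [dedupeAdjAux] at hx
  | cons y t ih =>
    intro x hx
    rw [List.pairwise_cons] at h1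
    by_cases hne : some (PySem.Str.lower y) ≠ some p
    · rw [show dedupeAdjAux (some p) (y :: t) = y :: dedupeAdjAux (some (PySem.Str.lower y)) t by
        simp [dedupeAdjAux, hne]] at hx
      have hyp : PySem.Str.lower y ≠ p := fun he => hne (by rw [he])
      rcases List.mem_cons.1 hx with rfl | hx'
      · exact lt_of_le_of_ne (h2 x (by simp)) (Ne.symm hyp)
      · have hlt := ih (p := PySem.Str.lower y) h1.2 h1.1 x hx'
        exact lt_of_le_of_lt (h2 y (by simp)) hlt
    · rw [show dedupeAdjAux (some p) (y :: t) = dedupeAdjAux (some p) t by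
        simp [dedupeAdjAux, hne]] at hx
      exact ih (p := p) h1.2 (fun z hz => h2 z (List.mem_cons_of_mem _ hz)) x hx

-- the keys of the dedupe output are strictly increasing
theorem dedupe_keys_pairwise (ys : List String) (prev : Option String)
    (h1 : ys.Pairwise (fun a b => PySem.Str.lower a ≤ PySem.Str.lower b))
    (hle : ∀ p, prev = some p → ∀ y ∈ ys, p ≤ PySem.Str.lower y) :
    ((dedupeAdjAux prev ys).map PySem.Str.lower).Pairwise (· < ·) := by
  induction ys generalizing prev with
  | nil => simp [dedupeAdjAux]
  | cons y t ih =>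
    rw [List.pairwise_cons] at h1
    by_cases hne : some (PySem.Str.lower y) ≠ prev
    · rw [show dedupeAdjAux prev (y :: t) = y :: dedupeAdjAux (some (PySem.Str.lower y)) t by
        simp [dedupeAdjAux, hne]]
      simp only [List.map]
      refine List.pairwise_cons.2 ⟨?_, ih (prev := some (PySem.Str.lower y)) h1.2 ?_⟩
      · intro q hq
        rcases List.mem_map.1 hq with ⟨z, hz, rfl⟩
        exact dedupe_chain t (PySem.Str.lower y) h1.2 h1.1 z hz
      · intro p hp z hz
        have hpy : p = PySem.Str.lower y := (Option.some.inj hp).symm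
        subst hpy
        exact h1.1 z hz
    · rw [show dedupeAdjAux prev (y :: t) = dedupeAdjAux prev t by simp [dedupeAdjAux, hne]]
      exact ih (prev := prev) h1.2 (fun p hp z hz => hle p hp z (List.mem_cons_of_mem _ hz))

-- the keys of the dedupe output are exactly the ordered dedup of the keys of ys
theorem dedupe_keys (ys : List String) (seen : List String) (prev : Option String)
    (h1 : ys.Pairwise (fun a b => PySem.Str.lower a ≤ PySem.Str.lower b))
    (hs : ∀ y ∈ ys, (seen.contains (PySem.Str.lower y) = true ↔ some (PySem.Str.lower y) = prev))
    (hle : ∀ p, prev = some p → ∀ y ∈ ys, p ≤ PySem.Str.lower y) :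
    List.foldl PySem.Set.add seen (ys.map PySem.Str.lower)
      = seen ++ (dedupeAdjAux prev ys).map PySem.Str.lower := by
  induction ys generalizing seen prev with
  | nil => simp [dedupeAdjAux]
  | cons y t ih =>
    rw [List.pairwise_cons] at h1
    by_cases hne : some (PySem.Str.lower y) ≠ prev
    · have hcon : seen.contains (PySem.Str.lower y) = false := by
        rcases Bool.eq_false_or_eq_true (seen.contains (PySem.Str.lower y)) with hb | hb
        · exact absurd ((hs y (by simp)).1 hb) hne
        · exact hb
      rw [show dedupeAdjAux prev (y :: t) = y :: dedupeAdjAux (some (PySem.Str.lower y)) t by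
        simp [dedupeAdjAux, hne]]
      simp only [List.map, List.foldl]
      have hnm : PySem.Str.lower y ∉ seen := by simpa using hcon
      have hadd : PySem.Set.add seen (PySem.Str.lower y) = seen ++ [PySem.Str.lower y] := by
        simp [PySem.Set.add, hnm]
      rw [hadd, ih (seen := seen ++ [PySem.Str.lower y]) (prev := some (PySem.Str.lower y)) h1.2 ?_ ?_]
      · simp
      · intro z hz
        constructor
        · intro hcz
          have hor : PySem.Str.lower z ∈ seen ∨ PySem.Str.lower z = PySem.Str.lower y := by
            simpa using hcz
          rcases hor with hin | he
          · have hsz := (hs z (List.mem_cons_of_mem _ hz)).1 (by simpa using hin)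
            cases hprev : prev with
            | none => rw [hprev] at hsz; exact absurd hsz (by simp)
            | some p =>
              rw [hprev] at hsz
              have hzp : PySem.Str.lower z = p := Option.some.inj hsz
              have hyz : PySem.Str.lower y ≤ PySem.Str.lower z := h1.1 z hz
              have hpy : p ≤ PySem.Str.lower y := hle p hprev y (by simp)
              have heq : PySem.Str.lower y = p := le_antisymm (hzp ▸ hyz) hpy
              exact absurd (by rw [hprev, heq] : some (PySem.Str.lower y) = prev) hne
          · simp [he]
        · intro he
          have hzy : PySem.Str.lower z = PySem.Str.lower y := Option.some.inj he
          simp [hzy]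
      · intro p hp z hz
        have hpy : p = PySem.Str.lower y := (Option.some.inj hp).symm
        subst hpy
        exact h1.1 z hz
    · have hcon : seen.contains (PySem.Str.lower y) = true := by
        apply (hs y (by simp)).2
        by_contra hne2
        exact hne hne2
      rw [show dedupeAdjAux prev (y :: t) = dedupeAdjAux prev t by simp [dedupeAdjAux, hne]]
      simp only [List.map, List.foldl]
      have hm : PySem.Str.lower y ∈ seen := by simpa using hcon
      rw [show PySem.Set.add seen (PySem.Str.lower y) = seen by simp [PySem.Set.add, hm]]
      exact ih (seen := seen) (prev := prev) h1.2 (fun z hz => hs z (List.mem_cons_of_mem _ hz))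
        (fun p hp z hz => hle p hp z (List.mem_cons_of_mem _ hz))

-- each element the dedupe keeps is the head of its key class in ys
theorem dedupe_repr (ys : List String) (prev : Option String)
    (h1 : ys.Pairwise (fun a b => PySem.Str.lower a ≤ PySem.Str.lower b))
    (hle : ∀ p, prev = some p → ∀ y ∈ ys, p ≤ PySem.Str.lower y) :
    dedupeAdjAux prev ys
      = ((dedupeAdjAux prev ys).map PySem.Str.lower).map
          (fun k => (ys.filter (fun s => PySem.Str.lower s == k)).headD "") := by
  induction ys generalizing prev with
  | nil => simp [dedupeAdjAux]
  | cons y t ih =>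
    rw [List.pairwise_cons] at h1
    have hrest : ∀ z ∈ dedupeAdjAux (some (PySem.Str.lower y)) t,
        ((y :: t).filter (fun s => PySem.Str.lower s == PySem.Str.lower z))
          = t.filter (fun s => PySem.Str.lower s == PySem.Str.lower z) := by
      intro z hz
      have hlt := dedupe_chain t (PySem.Str.lower y) h1.2 h1.1 z hz
      rw [List.filter_cons, if_neg (by simpa using ne_of_lt hlt)]
    by_cases hne : some (PySem.Str.lower y) ≠ prev
    · rw [show dedupeAdjAux prev (y :: t) = y :: dedupeAdjAux (some (PySem.Str.lower y)) t by
        simp [dedupeAdjAux, hne]]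
      simp only [List.map]
      have hhead : ((y :: t).filter (fun s => PySem.Str.lower s == PySem.Str.lower y)).headD "" = y := by
        rw [List.filter_cons, if_pos (by simp)]
        rfl
      rw [hhead]
      refine List.cons_eq_cons.2 ⟨rfl, ?_⟩
      have hmapeq :
          ((dedupeAdjAux (some (PySem.Str.lower y)) t).map PySem.Str.lower).map
              (fun k => ((y :: t).filter (fun s => PySem.Str.lower s == k)).headD "")
            = ((dedupeAdjAux (some (PySem.Str.lower y)) t).map PySem.Str.lower).map
              (fun k => (t.filter (fun s => PySem.Str.lower s == k)).headD "") := by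
        apply List.map_congr_left
        intro k hk
        rcases List.mem_map.1 hk with ⟨z, hz, rfl⟩
        rw [hrest z hz]
      rw [hmapeq]
      exact ih (prev := some (PySem.Str.lower y)) h1.2
        (fun p hp z hz => by
          have hpy : p = PySem.Str.lower y := (Option.some.inj hp).symm
          subst hpy
          exact h1.1 z hz)
    · have hprev : prev = some (PySem.Str.lower y) := by
        by_contra hne2
        exact hne (fun he => hne2 he.symm)
      rw [show dedupeAdjAux prev (y :: t) = dedupeAdjAux prev t by simp [dedupeAdjAux, hne]]
      subst hprev
      have hmapeq :
          ((dedupeAdjAux (some (PySem.Str.lower y)) t).map PySem.Str.lower).map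
              (fun k => ((y :: t).filter (fun s => PySem.Str.lower s == k)).headD "")
            = ((dedupeAdjAux (some (PySem.Str.lower y)) t).map PySem.Str.lower).map
              (fun k => (t.filter (fun s => PySem.Str.lower s == k)).headD "") := by
        apply List.map_congr_left
        intro k hk
        rcases List.mem_map.1 hk with ⟨z, hz, rfl⟩
        rw [hrest z hz]
      rw [hmapeq]
      exact ih (prev := some (PySem.Str.lower y)) h1.2
        (fun p hp z hz => by
          have hpy : p = PySem.Str.lower y := (Option.some.inj hp).symm
          subst hpy
          exact h1.1 z hz)

-- the core identity: first-wins dict mapped over its sorted keys = sort-then-adjacent-dedupe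
theorem main_eq (cs : List String) :
    (PySem.List.sorted ((cs.foldl stepS PySem.Dict.empty).keys) (fun k => k) false).map
        (fun k => (cs.foldl stepS PySem.Dict.empty).getD k "")
      = dedupeAdjAux none (PySem.List.sorted cs PySem.Str.lower false) := by
  have hpair : (PySem.List.sorted cs PySem.Str.lower false).Pairwise
      (fun a b => PySem.Str.lower a ≤ PySem.Str.lower b) :=
    PySem.List.sorted_pairwise cs PySem.Str.lower
  have hle0 : ∀ p, (none : Option String) = some p →
      ∀ y ∈ PySem.List.sorted cs PySem.Str.lower false, p ≤ PySem.Str.lower y := by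
    intro p hp
    exact absurd hp (by simp)
  have hKLpair : ((dedupeAdjAux none (PySem.List.sorted cs PySem.Str.lower false)).map PySem.Str.lower).Pairwise (· < ·) :=
    dedupe_keys_pairwise _ none hpair hle0
  have hkeys : (cs.foldl stepS PySem.Dict.empty).keys
      = List.foldl PySem.Set.add ([] : List String) (cs.map PySem.Str.lower) := by
    rw [keys_loop]
    rfl
  have hKL : List.foldl PySem.Set.add ([] : List String)
        ((PySem.List.sorted cs PySem.Str.lower false).map PySem.Str.lower)
      = (dedupeAdjAux none (PySem.List.sorted cs PySem.Str.lower false)).map PySem.Str.lower := by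
    have h := dedupe_keys (PySem.List.sorted cs PySem.Str.lower false) [] none hpair
      (by intro y hy; simp) hle0
    simpa using h
  have hmemiff : ∀ a, a ∈ (dedupeAdjAux none (PySem.List.sorted cs PySem.Str.lower false)).map PySem.Str.lower
      ↔ a ∈ (cs.foldl stepS PySem.Dict.empty).keys := by
    intro a
    rw [hkeys, ← hKL]
    have h1 : ∀ (l : List String), (a ∈ List.foldl PySem.Set.add ([] : List String) l ↔ a ∈ l) :=
      fun l => PySem.Set.mem_ofList l a
    rw [h1, h1]
    exact List.Perm.mem_iff (List.Perm.map _ (PySem.List.sorted_perm cs PySem.Str.lower false))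
  have hnodup1 : ((dedupeAdjAux none (PySem.List.sorted cs PySem.Str.lower false)).map PySem.Str.lower).Nodup := by
    rw [← hKL]
    exact PySem.Set.nodup_ofList _
  have hnodup2 : ((cs.foldl stepS PySem.Dict.empty).keys).Nodup := by
    rw [hkeys]
    exact PySem.Set.nodup_ofList _
  have hperm : ((dedupeAdjAux none (PySem.List.sorted cs PySem.Str.lower false)).map PySem.Str.lower).Perm
      ((cs.foldl stepS PySem.Dict.empty).keys) :=
    (List.perm_ext_iff_of_nodup hnodup1 hnodup2).2 hmemiff
  have hsorted : PySem.List.sorted ((cs.foldl stepS PySem.Dict.empty).keys) (fun k => k) false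
      = (dedupeAdjAux none (PySem.List.sorted cs PySem.Str.lower false)).map PySem.Str.lower :=
    PySem.List.sorted_eq_of_perm_of_pairwise_lt _ _ _ hperm hKLpair
  rw [hsorted]
  conv_rhs => rw [dedupe_repr (PySem.List.sorted cs PySem.Str.lower false) none hpair hle0]
  apply List.map_congr_left
  intro k hk
  rw [getD_loop, PySem.Dict.contains_empty]
  simp only [Bool.false_eq_true, if_false]
  rw [sorted_filter_key]

-- ===== VERDICT (by name: the statement is the Claim_ definition above) =====
theorem normalize_subjects_py_spec : Claim_equal_normalize_subjects_py := by
  unfold Claim_equal_normalize_subjects_py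
  intro values _
  unfold Spec_normalize_subjects_py
  simp only [normalize_subjects_py, normalize_subjects_py_alt]
  rw [foldA_eq]
  exact main_eq (cleanVals values)
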